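-- pv_equiv track=rewrite | github.com/sabawasabi/my-news-app | main.py | build_slack_message
-- ===== SOURCE A (Python) =====
-- def build_slack_message(
--     arknights_news: list[tuple[str, str]],
--     game_ranking: list[tuple[str, str]],
--     zenn_articles: list[tuple[str, str]],
-- ) -> str:
--     """
--     3種類の情報を1つのSlackメッセージとして整形する。
--     セクションごとに太字見出しを付与。
--     """
--     lines: list[str] = []
--
--     # アークナイツ関連
--     lines.append("*アークナイツ関連ニュース*")
--     if arknights_news:
--         for i, (title, url) in enumerate(arknights_news, start=1):
--             lines.append(f"{i}. {title}")
--             lines.append(f"{url}")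
--     else:
--         lines.append("該当するニュースが見つかりませんでした。")
--     lines.append("")  # 空行で区切り
--
--     # ゲームランキング
--     lines.append("*ゲーム全般：ランキング上位3件*")
--     if game_ranking:
--         for i, (title, url) in enumerate(game_ranking, start=1):
--             lines.append(f"{i}. {title}")
--             lines.append(f"{url}")
--     else:
--         lines.append("ランキング情報を取得できませんでした。")
--     lines.append("")
--
--     # Zennトレンド（Python/AI）
--     lines.append("*技術系：Zennトレンド（Python / AI）*")
--     if zenn_articles:
--         for i, (title, url) in enumerate(zenn_articles, start=1):
--             lines.append(f"{i}. {title}")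
--             lines.append(f"{url}")
--     else:
--         lines.append("関連する記事を取得できませんでした。")
--
--     return "\n".join(lines)
-- ===== SOURCE B (Python) =====
-- def build_slack_message(
--     arknights_news: list[tuple[str, str]],
--     game_ranking: list[tuple[str, str]],
--     zenn_articles: list[tuple[str, str]],
-- ) -> str:
--     """Recursive direct string construction: no lines list, no join —
--     each section's body is built by structural recursion concatenating strings."""
--
--     def body(items, i):
--         if not items:
--             return ""
--         title, url = items[0]
--         return f"\n{i}. {title}\n{url}" + body(items[1:], i + 1)
--
--     def section(heading, items, empty_msg):
--         return heading + (body(items, 1) if items else "\n" + empty_msg)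
--
--     return (
--         section("*アークナイツ関連ニュース*", arknights_news, "該当するニュースが見つかりませんでした。")
--         + "\n\n"
--         + section("*ゲーム全般：ランキング上位3件*", game_ranking, "ランキング情報を取得できませんでした。")
--         + "\n\n"
--         + section("*技術系：Zennトレンド（Python / AI）*", zenn_articles, "関連する記事を取得できませんでした。")
--     )
-- ===== Notes on version B (the rewrite author's own statement) =====
-- stated objective: alternative
-- what changed: Replaces A's accumulate-a-list-of-lines-then-'\n'.join pipeline by direct recursive string construction: a structural recursion over each item list concatenates the formatted entries (and section separators) straight into the result, with no intermediate lines list and no join.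
import Mathlib
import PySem

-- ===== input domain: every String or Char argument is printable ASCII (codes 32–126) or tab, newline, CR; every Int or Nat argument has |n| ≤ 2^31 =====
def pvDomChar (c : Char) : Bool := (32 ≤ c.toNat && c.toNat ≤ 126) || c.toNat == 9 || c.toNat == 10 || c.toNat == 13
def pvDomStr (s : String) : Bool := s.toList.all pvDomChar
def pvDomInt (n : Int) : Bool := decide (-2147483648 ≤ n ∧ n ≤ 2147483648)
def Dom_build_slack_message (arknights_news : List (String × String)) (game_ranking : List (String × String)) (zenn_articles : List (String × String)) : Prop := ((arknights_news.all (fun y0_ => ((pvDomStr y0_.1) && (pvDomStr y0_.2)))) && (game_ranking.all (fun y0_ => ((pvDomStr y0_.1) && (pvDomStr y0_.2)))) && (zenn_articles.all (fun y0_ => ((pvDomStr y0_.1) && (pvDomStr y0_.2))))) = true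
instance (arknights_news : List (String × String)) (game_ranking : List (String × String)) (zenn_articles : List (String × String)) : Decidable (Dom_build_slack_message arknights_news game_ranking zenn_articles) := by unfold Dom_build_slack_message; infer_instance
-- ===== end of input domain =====

-- B builds the message by structural recursion with direct string concatenation
-- (no lines list, no join), instead of A's accumulate-lines-then-join (objective: alternative).


-- ===== PORT A =====
def build_slack_message (arknights_news : List (String × String)) (game_ranking : List (String × String)) (zenn_articles : List (String × String)) : String :=
  let lines : List String := []
  -- アークナイツ関連
  let lines := lines ++ ["*アークナイツ関連ニュース*"]
  let lines :=
    if arknights_news.isEmpty = false then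
      (PySem.List.enumerate arknights_news 1).foldl
        (fun acc p => acc ++ [PySem.Int.toStr p.1 ++ ". " ++ p.2.1] ++ [p.2.2]) lines
    else lines ++ ["該当するニュースが見つかりませんでした。"]
  let lines := lines ++ [""]  -- 空行で区切り
  -- ゲームランキング
  let lines := lines ++ ["*ゲーム全般：ランキング上位3件*"]
  let lines :=
    if game_ranking.isEmpty = false then
      (PySem.List.enumerate game_ranking 1).foldl
        (fun acc p => acc ++ [PySem.Int.toStr p.1 ++ ". " ++ p.2.1] ++ [p.2.2]) lines
    else lines ++ ["ランキング情報を取得できませんでした。"]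
  let lines := lines ++ [""]
  -- Zennトレンド（Python/AI）
  let lines := lines ++ ["*技術系：Zennトレンド（Python / AI）*"]
  let lines :=
    if zenn_articles.isEmpty = false then
      (PySem.List.enumerate zenn_articles 1).foldl
        (fun acc p => acc ++ [PySem.Int.toStr p.1 ++ ". " ++ p.2.1] ++ [p.2.2]) lines
    else lines ++ ["関連する記事を取得できませんでした。"]
  PySem.Str.join "\n" lines

-- ===== PORT B =====
-- helper = Source B's recursive `body`: the section body built by recursion on the item list
def pvBodyB : List (String × String) → Int → String
  | [], _ => ""
  | (title, url) :: rest, i =>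
      "\n" ++ PySem.Int.toStr i ++ ". " ++ title ++ "\n" ++ url ++ pvBodyB rest (i + 1)

-- helper = Source B's `section`
def pvSectionB (heading : String) (items : List (String × String)) (empty_msg : String) : String :=
  heading ++ (if items.isEmpty = false then pvBodyB items 1 else "\n" ++ empty_msg)

def build_slack_message_alt (arknights_news : List (String × String)) (game_ranking : List (String × String)) (zenn_articles : List (String × String)) : String :=
  pvSectionB "*アークナイツ関連ニュース*" arknights_news "該当するニュースが見つかりませんでした。"
    ++ "\n\n"
    ++ pvSectionB "*ゲーム全般：ランキング上位3件*" game_ranking "ランキング情報を取得できませんでした。"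
    ++ "\n\n"
    ++ pvSectionB "*技術系：Zennトレンド（Python / AI）*" zenn_articles "関連する記事を取得できませんでした。"

-- ===== PRECONDITION & SPEC =====
def Spec_build_slack_message (arknights_news : List (String × String)) (game_ranking : List (String × String)) (zenn_articles : List (String × String)) (out : String) : Prop := out = build_slack_message_alt arknights_news game_ranking zenn_articles
instance (arknights_news : List (String × String)) (game_ranking : List (String × String)) (zenn_articles : List (String × String)) (out : String) : Decidable (Spec_build_slack_message arknights_news game_ranking zenn_articles out) := by unfold Spec_build_slack_message; infer_instance

-- ===== CLAIM (what is proved, stated in full; the proofs are below) =====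
def Claim_equal_build_slack_message : Prop := ∀ (arknights_news : List (String × String)) (game_ranking : List (String × String)) (zenn_articles : List (String × String)), Dom_build_slack_message arknights_news game_ranking zenn_articles → Spec_build_slack_message arknights_news game_ranking zenn_articles (build_slack_message arknights_news game_ranking zenn_articles)

-- ===== LEMMAS AND PROOFS =====

-- the lines contributed by one section's item loop in A, starting at index s
def pvItemLines : List (String × String) → Int → List String
  | [], _ => []
  | (t, u) :: rest, s => (PySem.Int.toStr s ++ ". " ++ t) :: u :: pvItemLines rest (s + 1)

theorem pvFold_eq (items : List (String × String)) (s : Int) (acc : List String) :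
    (PySem.List.enumerate items s).foldl
      (fun acc p => acc ++ [PySem.Int.toStr p.1 ++ ". " ++ p.2.1] ++ [p.2.2]) acc
      = acc ++ pvItemLines items s := by
  induction items generalizing s acc with
  | nil => simp [PySem.List.enumerate, pvItemLines]
  | cons x rest ih =>
    obtain ⟨t, u⟩ := x
    rw [PySem.List.enumerate_cons, List.foldl_cons, ih]
    simp [pvItemLines, List.append_assoc]

-- one section's full list of lines in A
def pvSecLines (heading : String) (items : List (String × String)) (emptyMsg : String) : List String :=
  heading :: (if items.isEmpty = false then pvItemLines items 1 else [emptyMsg])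

-- joining A's item lines after a head h = h followed by B's recursively built body
theorem pv_join_body (h : String) (items : List (String × String)) (s : Int) :
    PySem.Chars.join ("\n".toList) (h.toList :: (pvItemLines items s).map String.toList)
      = h.toList ++ (pvBodyB items s).toList := by
  induction items generalizing h s with
  | nil => simp [pvItemLines, pvBodyB, PySem.Chars.join_singleton]
  | cons x rest ih =>
    obtain ⟨t, u⟩ := x
    simp only [pvItemLines, pvBodyB, List.map_cons]
    rw [PySem.Chars.join_cons_cons, PySem.Chars.join_cons_cons, ih u (s + 1)]
    simp [List.append_assoc]

-- A's section (joined lines) = B's section string, at the char-list level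
theorem pv_sec_eq (h : String) (items : List (String × String)) (e : String) :
    PySem.Chars.join ("\n".toList) ((pvSecLines h items e).map String.toList)
      = (pvSectionB h items e).toList := by
  unfold pvSecLines pvSectionB
  split
  · rw [List.map_cons, pv_join_body]
    simp
  · rw [List.map_cons, List.map_singleton, PySem.Chars.join_cons_cons, PySem.Chars.join_singleton]
    simp

theorem pv_join_append (sep : List Char) (xs ys : List (List Char)) (hx : xs ≠ []) (hy : ys ≠ []) :
    PySem.Chars.join sep (xs ++ ys) =
      PySem.Chars.join sep xs ++ sep ++ PySem.Chars.join sep ys := by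
  induction xs with
  | nil => cases hx rfl
  | cons p rest ih =>
    cases rest with
    | nil =>
      cases ys with
      | nil => cases hy rfl
      | cons q ys' => simp [PySem.Chars.join_cons_cons, PySem.Chars.join_singleton]
    | cons q rest' =>
      rw [List.cons_append, List.cons_append, PySem.Chars.join_cons_cons, ← List.cons_append,
          ih (by simp), PySem.Chars.join_cons_cons]
      simp [List.append_assoc]

-- joining with an interposed "" line doubles the separator
theorem pv_join_blank (sep : List Char) (xs ys : List (List Char)) (hx : xs ≠ []) (hy : ys ≠ []) :
    PySem.Chars.join sep (xs ++ [[]] ++ ys) =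
      PySem.Chars.join sep xs ++ sep ++ sep ++ PySem.Chars.join sep ys := by
  rw [List.append_assoc, pv_join_append sep xs ([[]] ++ ys) hx (by simp)]
  cases ys with
  | nil => cases hy rfl
  | cons q ys' =>
    rw [List.singleton_append, PySem.Chars.join_cons_cons]
    simp [List.append_assoc]

theorem pvSecLines_map_ne (h : String) (items : List (String × String)) (e : String) :
    (pvSecLines h items e).map String.toList ≠ [] := by
  simp [pvSecLines]

-- ===== VERDICT (by name: the statement is the Claim_ definition above) =====
theorem build_slack_message_spec : Claim_equal_build_slack_message := by
  intro a g z _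
  unfold Spec_build_slack_message build_slack_message_alt
  apply String.toList_injective
  have hsec : ∀ (xs : List (String × String)) (e : String) (acc : List String),
      (if xs.isEmpty = false then
        (PySem.List.enumerate xs 1).foldl
          (fun acc p => acc ++ [PySem.Int.toStr p.1 ++ ". " ++ p.2.1] ++ [p.2.2]) acc
       else acc ++ [e])
      = acc ++ (if xs.isEmpty = false then pvItemLines xs 1 else [e]) := by
    intro xs e acc
    split
    · rw [pvFold_eq]
    · rfl
  have hshape :
      ("*アークナイツ関連ニュース*" :: (if a.isEmpty = false then pvItemLines a 1 else ["該当するニュースが見つかりませんでした。"]))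
        ++ [""] ++ ("*ゲーム全般：ランキング上位3件*" :: (if g.isEmpty = false then pvItemLines g 1 else ["ランキング情報を取得できませんでした。"]))
        ++ [""] ++ ("*技術系：Zennトレンド（Python / AI）*" :: (if z.isEmpty = false then pvItemLines z 1 else ["関連する記事を取得できませんでした。"]))
      = pvSecLines "*アークナイツ関連ニュース*" a "該当するニュースが見つかりませんでした。"
        ++ [""] ++ pvSecLines "*ゲーム全般：ランキング上位3件*" g "ランキング情報を取得できませんでした。"
        ++ [""] ++ pvSecLines "*技術系：Zennトレンド（Python / AI）*" z "関連する記事を取得できませんでした。" := by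
    simp [pvSecLines, List.append_assoc]
  have hA :
      build_slack_message a g z
        = PySem.Str.join "\n"
            (pvSecLines "*アークナイツ関連ニュース*" a "該当するニュースが見つかりませんでした。"
              ++ [""] ++ pvSecLines "*ゲーム全般：ランキング上位3件*" g "ランキング情報を取得できませんでした。"
              ++ [""] ++ pvSecLines "*技術系：Zennトレンド（Python / AI）*" z "関連する記事を取得できませんでした。") := by
    unfold build_slack_message
    simp only []
    rw [hsec, hsec, hsec]
    congr 1
    simpa [List.append_assoc] using hshape
  rw [hA]
  unfold PySem.Str.join
  have he : ("".toList : List Char) = [] := by decide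
  have hre :
      ((pvSecLines "*アークナイツ関連ニュース*" a "該当するニュースが見つかりませんでした。"
        ++ [""] ++ pvSecLines "*ゲーム全般：ランキング上位3件*" g "ランキング情報を取得できませんでした。"
        ++ [""] ++ pvSecLines "*技術系：Zennトレンド（Python / AI）*" z "関連する記事を取得できませんでした。").map String.toList)
      = (pvSecLines "*アークナイツ関連ニュース*" a "該当するニュースが見つかりませんでした。").map String.toList
        ++ [([] : List Char)]
        ++ ((pvSecLines "*ゲーム全般：ランキング上位3件*" g "ランキング情報を取得できませんでした。").map String.toList
            ++ [([] : List Char)]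
            ++ (pvSecLines "*技術系：Zennトレンド（Python / AI）*" z "関連する記事を取得できませんでした。").map String.toList) := by
    simp [he, List.append_assoc]
  rw [hre, pv_join_blank _ _ _ (pvSecLines_map_ne _ _ _) (by simp),
      pv_join_blank _ _ _ (pvSecLines_map_ne _ _ _) (pvSecLines_map_ne _ _ _)]
  rw [pv_sec_eq, pv_sec_eq, pv_sec_eq]
  have hnn : ("\n\n".toList : List Char) = "\n".toList ++ "\n".toList := by decide
  simp [hnn, List.append_assoc]
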